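-- pv_equiv track=rewrite | github.com/smuktevi/fakenews | gtut/utility.py | remove_userarticlepair_from_right
-- ===== SOURCE A (Python) =====
-- def remove_userarticlepair_from_right(edges_list, userarticlepairs_list, ua_pairs_remaining_count):
--     if len(set(userarticlepairs_list)) == ua_pairs_remaining_count - 1:
--         return edges_list, userarticlepairs_list
--     edges_count = len(edges_list) - 1
--     edges_list = edges_list[0:edges_count]
--     userarticlepairs_length = len(userarticlepairs_list) - 1
--     userarticlepairs_list = userarticlepairs_list[0:userarticlepairs_length]
--     return remove_userarticlepair_from_right(edges_list, userarticlepairs_list, ua_pairs_remaining_count)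
-- ===== SOURCE B (Python) =====
-- def remove_userarticlepair_from_right(edges_list, userarticlepairs_list, ua_pairs_remaining_count):
--     # One pass: find the first index where the running distinct count would
--     # exceed target = ua_pairs_remaining_count - 1, then slice both lists once.
--     # An unreachable target (A recurses until RecursionError) raises ValueError.
--     target = ua_pairs_remaining_count - 1
--     if target < 0:
--         raise ValueError("ua_pairs_remaining_count must be at least 1")
--     break_index = len(userarticlepairs_list)
--     seen = set()
--     for i, x in enumerate(userarticlepairs_list):
--         if x not in seen:
--             seen.add(x)
--             if len(seen) > target:
--                 break_index = i
--                 break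
--     if break_index == len(userarticlepairs_list) and len(seen) < target:
--         raise ValueError("cannot reach ua_pairs_remaining_count - 1 distinct pairs")
--     removed = len(userarticlepairs_list) - break_index
--     return (edges_list[:max(0, len(edges_list) - removed)],
--             userarticlepairs_list[:break_index])
-- ===== Notes on version B (the rewrite author's own statement) =====
-- stated objective: faster
-- what changed: A repeatedly truncates both lists by one and recomputes set() of the whole remaining list each step; B makes a single left-to-right pass tracking the running distinct count to find the cut index, then slices each list once (and raises ValueError, instead of A's eventual RecursionError, when the target distinct count is unreachable — outside Pre_).
import Mathlib
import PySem

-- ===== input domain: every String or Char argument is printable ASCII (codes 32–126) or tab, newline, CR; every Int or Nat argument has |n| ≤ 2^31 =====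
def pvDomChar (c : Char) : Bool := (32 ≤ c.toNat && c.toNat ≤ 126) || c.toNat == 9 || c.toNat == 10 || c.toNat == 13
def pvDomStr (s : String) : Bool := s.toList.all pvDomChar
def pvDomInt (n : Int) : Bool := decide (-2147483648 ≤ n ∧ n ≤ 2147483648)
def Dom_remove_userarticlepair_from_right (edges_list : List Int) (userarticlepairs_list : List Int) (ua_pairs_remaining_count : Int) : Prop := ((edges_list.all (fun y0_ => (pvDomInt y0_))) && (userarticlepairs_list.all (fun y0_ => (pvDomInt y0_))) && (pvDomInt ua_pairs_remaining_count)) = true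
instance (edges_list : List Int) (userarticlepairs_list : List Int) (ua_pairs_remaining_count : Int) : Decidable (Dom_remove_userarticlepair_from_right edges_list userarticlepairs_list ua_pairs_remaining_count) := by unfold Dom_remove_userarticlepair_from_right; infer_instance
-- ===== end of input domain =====

-- B replaces A's quadratic truncate-and-recompute-set recursion by a single
-- left-to-right pass that finds the cut index, then slices each list once (faster).
-- Python returns a pair (edges, pairs); per the seeded signature it is a 2-element List (List Int).

-- ===== PORT A =====
-- A's recursion does not structurally terminate when it never hits the target
-- (Python then raises RecursionError, excluded by Pre_); fuel = length + 1 is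
-- enough for every terminating run and only makes the transcription total.
def remA_go : Nat → List Int → List Int → Int → List (List Int)
  | 0, edges_list, userarticlepairs_list, _ => [edges_list, userarticlepairs_list]
  | fuel + 1, edges_list, userarticlepairs_list, ua_pairs_remaining_count =>
    if ((PySem.Set.ofList userarticlepairs_list).length : Int) = ua_pairs_remaining_count - 1 then
      [edges_list, userarticlepairs_list]
    else
      remA_go fuel
        (PySem.List.slice edges_list (some 0) (some ((edges_list.length : Int) - 1)))
        (PySem.List.slice userarticlepairs_list (some 0) (some ((userarticlepairs_list.length : Int) - 1)))
        ua_pairs_remaining_count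

def remove_userarticlepair_from_right (edges_list : List Int) (userarticlepairs_list : List Int) (ua_pairs_remaining_count : Int) : List (List Int) :=
  remA_go (userarticlepairs_list.length + 1) edges_list userarticlepairs_list ua_pairs_remaining_count

-- ===== PORT B =====
-- the for-loop of Source B: (some i, seen) if it breaks at index i, else (none, final seen)
def remB_go : List Int → Nat → PySem.Set Int → Int → Option Nat × PySem.Set Int
  | [], _, seen, _ => (none, seen)
  | x :: rest, i, seen, target =>
    if PySem.Set.contains seen x then remB_go rest (i + 1) seen target
    else if ((PySem.Set.add seen x).length : Int) > target then (some i, PySem.Set.add seen x)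
    else remB_go rest (i + 1) (PySem.Set.add seen x) target

-- break_index = (fst).getD length, removed = length - break_index (Nat subtraction is
-- exactly Source B's max(0, …)); the slices of Source B have nonnegative clamped stops = List.take.
-- The two ValueError branches of Source B return [] here; both lie outside Pre_.
def remove_userarticlepair_from_right_alt (edges_list : List Int) (userarticlepairs_list : List Int) (ua_pairs_remaining_count : Int) : List (List Int) :=
  if ua_pairs_remaining_count - 1 < 0 then []  -- ValueError in Source B
  else
    match remB_go userarticlepairs_list 0 PySem.Set.empty (ua_pairs_remaining_count - 1) with
    | (some breakIndex, _) =>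
      [edges_list.take (edges_list.length - (userarticlepairs_list.length - breakIndex)),
       userarticlepairs_list.take breakIndex]
    | (none, seen) =>
      if (seen.length : Int) < ua_pairs_remaining_count - 1 then []  -- ValueError in Source B
      else [edges_list.take edges_list.length, userarticlepairs_list.take userarticlepairs_list.length]

-- ===== PRECONDITION & SPEC =====
-- Pre_ holds exactly on the inputs where A returns: A raises RecursionError whenever
-- the target count ua_pairs_remaining_count - 1 is negative or larger than the
-- number of distinct elements of userarticlepairs_list.
def Pre_remove_userarticlepair_from_right (edges_list : List Int) (userarticlepairs_list : List Int) (ua_pairs_remaining_count : Int) : Prop :=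
  1 ≤ ua_pairs_remaining_count ∧
  ua_pairs_remaining_count - 1 ≤ ((PySem.Set.ofList userarticlepairs_list).length : Int)
instance (edges_list : List Int) (userarticlepairs_list : List Int) (ua_pairs_remaining_count : Int) : Decidable (Pre_remove_userarticlepair_from_right edges_list userarticlepairs_list ua_pairs_remaining_count) := by unfold Pre_remove_userarticlepair_from_right; infer_instance

def pvWitness_remove_userarticlepair_from_right : List Int × List Int × Int := ([3, 4], [1, 1, 2], 2)

def Spec_remove_userarticlepair_from_right (edges_list : List Int) (userarticlepairs_list : List Int) (ua_pairs_remaining_count : Int) (out : List (List Int)) : Prop := out = remove_userarticlepair_from_right_alt edges_list userarticlepairs_list ua_pairs_remaining_count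
instance (edges_list : List Int) (userarticlepairs_list : List Int) (ua_pairs_remaining_count : Int) (out : List (List Int)) : Decidable (Spec_remove_userarticlepair_from_right edges_list userarticlepairs_list ua_pairs_remaining_count out) := by unfold Spec_remove_userarticlepair_from_right; infer_instance

-- ===== CLAIM (what is proved, stated in full; the proofs are below) =====
def Claim_equal_remove_userarticlepair_from_right : Prop := ∀ (edges_list : List Int) (userarticlepairs_list : List Int) (ua_pairs_remaining_count : Int), Dom_remove_userarticlepair_from_right edges_list userarticlepairs_list ua_pairs_remaining_count → Pre_remove_userarticlepair_from_right edges_list userarticlepairs_list ua_pairs_remaining_count → Spec_remove_userarticlepair_from_right edges_list userarticlepairs_list ua_pairs_remaining_count (remove_userarticlepair_from_right edges_list userarticlepairs_list ua_pairs_remaining_count)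

-- ===== LEMMAS AND PROOFS =====

-- the slice xs[0:len(xs)-1] is dropLast (also for the empty list, where the stop is -1)
theorem slice_pred_eq_dropLast (xs : List Int) :
    PySem.List.slice xs (some 0) (some ((xs.length : Int) - 1)) = xs.dropLast := by
  cases xs with
  | nil => rfl
  | cons a l =>
    have h : ((a :: l).length : Int) - 1 = ((l.length : Nat) : Int) := by
      simp
    rw [h, PySem.List.slice_zero_start, PySem.List.slice_to_natCast]
    rw [List.dropLast_eq_take]
    simp

-- when the loop never breaks, the final seen is Set.update of the consumed block
theorem remB_go_none_eq (xs : List Int) (i : Nat) (seen : PySem.Set Int) (t : Int)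
    (h : (remB_go xs i seen t).1 = none) :
    remB_go xs i seen t = (none, PySem.Set.update seen xs) := by
  induction xs generalizing i seen with
  | nil => simp [remB_go, PySem.Set.update]
  | cons x rest ih =>
    rw [remB_go] at h ⊢
    rw [PySem.Set.update_cons]
    by_cases hc : PySem.Set.contains seen x = true
    · rw [if_pos hc] at h ⊢
      rw [PySem.Set.add_of_mem ((PySem.Set.contains_iff seen x).mp hc)]
      exact ih _ _ h
    · rw [if_neg hc] at h ⊢
      by_cases hgt : ((PySem.Set.add seen x).length : Int) > t
      · rw [if_pos hgt] at h; exact absurd h (by simp)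
      · rw [if_neg hgt] at h ⊢
        exact ih _ _ h

theorem remB_go_append_none (xs ys : List Int) (i : Nat) (seen : PySem.Set Int) (t : Int)
    (h : (remB_go xs i seen t).1 = none) :
    remB_go (xs ++ ys) i seen t = remB_go ys (i + xs.length) (PySem.Set.update seen xs) t := by
  induction xs generalizing i seen with
  | nil => simp [PySem.Set.update]
  | cons x rest ih =>
    rw [List.cons_append]
    rw [remB_go] at h ⊢
    rw [PySem.Set.update_cons]
    by_cases hc : PySem.Set.contains seen x = true
    · rw [if_pos hc] at h ⊢
      rw [PySem.Set.add_of_mem ((PySem.Set.contains_iff seen x).mp hc)]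
      rw [ih _ _ h]
      congr 1
      simp; omega
    · rw [if_neg hc] at h ⊢
      by_cases hgt : ((PySem.Set.add seen x).length : Int) > t
      · rw [if_pos hgt] at h; exact absurd h (by simp)
      · rw [if_neg hgt] at h ⊢
        rw [ih _ _ h]
        congr 1
        simp; omega

theorem remB_go_append_some (xs ys : List Int) (i : Nat) (seen : PySem.Set Int) (t : Int)
    (L : Nat) (S : PySem.Set Int) (h : remB_go xs i seen t = (some L, S)) :
    remB_go (xs ++ ys) i seen t = (some L, S) := by
  induction xs generalizing i seen with
  | nil => simp [remB_go] at h
  | cons x rest ih =>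
    rw [List.cons_append]
    rw [remB_go] at h ⊢
    by_cases hc : PySem.Set.contains seen x = true
    · rw [if_pos hc] at h ⊢; exact ih _ _ h
    · rw [if_neg hc] at h ⊢
      by_cases hgt : ((PySem.Set.add seen x).length : Int) > t
      · rwa [if_pos hgt] at h ⊢
      · rw [if_neg hgt] at h ⊢; exact ih _ _ h

theorem remB_go_some_lt (xs : List Int) (i : Nat) (seen : PySem.Set Int) (t : Int)
    (L : Nat) (S : PySem.Set Int) (h : remB_go xs i seen t = (some L, S)) : L < i + xs.length := by
  induction xs generalizing i seen with
  | nil => simp [remB_go] at h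
  | cons x rest ih =>
    rw [remB_go] at h
    by_cases hc : PySem.Set.contains seen x = true
    · rw [if_pos hc] at h; have := ih _ _ h; simp at *; omega
    · rw [if_neg hc] at h
      by_cases hgt : ((PySem.Set.add seen x).length : Int) > t
      · rw [if_pos hgt] at h; simp at h ⊢; omega
      · rw [if_neg hgt] at h; have := ih _ _ h; simp at *; omega

theorem length_le_update (xs : List Int) (seen : PySem.Set Int) :
    seen.length ≤ (PySem.Set.update seen xs).length := by
  induction xs generalizing seen with
  | nil => simp [PySem.Set.update]
  | cons x rest ih =>
    rw [PySem.Set.update_cons]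
    refine le_trans ?_ (ih (PySem.Set.add seen x))
    rw [PySem.Set.add]
    split
    · exact le_refl _
    · simp

theorem remB_go_none_iff (xs : List Int) (i : Nat) (seen : PySem.Set Int) (t : Int)
    (h : (seen.length : Int) ≤ t) :
    (remB_go xs i seen t).1 = none ↔ ((PySem.Set.update seen xs).length : Int) ≤ t := by
  induction xs generalizing i seen with
  | nil => simpa [remB_go, PySem.Set.update] using h
  | cons x rest ih =>
    rw [remB_go, PySem.Set.update_cons]
    by_cases hc : PySem.Set.contains seen x = true
    · rw [if_pos hc, PySem.Set.add_of_mem ((PySem.Set.contains_iff seen x).mp hc)]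
      exact ih _ _ h
    · rw [if_neg hc]
      have hlen : (PySem.Set.add seen x).length = seen.length + 1 := by
        rw [PySem.Set.add_of_not_mem (fun hm => hc ((PySem.Set.contains_iff seen x).mpr hm))]
        simp
      by_cases hgt : ((PySem.Set.add seen x).length : Int) > t
      · rw [if_pos hgt]
        constructor
        · intro habs; exact absurd habs (by simp)
        · intro hle
          have := length_le_update rest (PySem.Set.add seen x)
          omega
      · rw [if_neg hgt]
        exact ih _ _ (by omega)

theorem length_add_bounds (s : PySem.Set Int) (x : Int) :
    s.length ≤ (PySem.Set.add s x).length ∧ (PySem.Set.add s x).length ≤ s.length + 1 := by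
  rw [PySem.Set.add]
  split
  · omega
  · simp

-- B agrees with one truncation step of A when the target has not been reached yet
theorem alt_step (e v : List Int) (y : Int) (c : Int) (h1 : 1 ≤ c)
    (hpre : c - 1 ≤ ((PySem.Set.ofList v).length : Int))
    (hlt : c - 1 < ((PySem.Set.ofList (v ++ [y])).length : Int)) :
    remove_userarticlepair_from_right_alt e.dropLast v c =
    remove_userarticlepair_from_right_alt e (v ++ [y]) c := by
  unfold remove_userarticlepair_from_right_alt
  rw [if_neg (by omega), if_neg (by omega)]
  rcases hv : remB_go v 0 PySem.Set.empty (c - 1) with ⟨o, S⟩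
  rcases o with _ | L
  · -- the pass over v never breaks: the break happens exactly at index v.length
    have hSn : remB_go v 0 PySem.Set.empty (c - 1) = (none, PySem.Set.ofList v) := by
      rw [remB_go_none_eq v 0 PySem.Set.empty (c - 1) (by rw [hv]), PySem.Set.update_empty]
    have hS : S = PySem.Set.ofList v := by rw [hv] at hSn; exact (Prod.mk.injEq _ _ _ _ ▸ hSn).2
    have hDv : ((PySem.Set.ofList v).length : Int) ≤ c - 1 := by
      have := (remB_go_none_iff v 0 PySem.Set.empty (c - 1) (by simp [PySem.Set.empty]; omega)).mp
        (by rw [hv])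
      rwa [PySem.Set.update_empty] at this
    have hofs : PySem.Set.ofList (v ++ [y]) = PySem.Set.add (PySem.Set.ofList v) y :=
      PySem.Set.ofList_append_singleton v y
    have hb := length_add_bounds (PySem.Set.ofList v) y
    rw [hofs] at hlt
    have hcont : PySem.Set.contains (PySem.Set.ofList v) y = false := by
      by_contra hcy
      have : PySem.Set.add (PySem.Set.ofList v) y = PySem.Set.ofList v :=
        PySem.Set.add_of_mem ((PySem.Set.contains_iff _ y).mp (by simpa using hcy))
      rw [this] at hlt; omega
    have hfull : remB_go (v ++ [y]) 0 PySem.Set.empty (c - 1) =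
        (some v.length, PySem.Set.add (PySem.Set.ofList v) y) := by
      rw [remB_go_append_none v [y] 0 PySem.Set.empty (c - 1) (by rw [hv])]
      rw [PySem.Set.update_empty]
      rw [remB_go]
      rw [hcont]
      simp only [Bool.false_eq_true, if_false]
      rw [if_pos (by omega)]
      simp
    subst hS
    rw [hfull]
    dsimp only
    rw [if_neg (by omega)]
    simp only [List.cons.injEq, and_true]
    constructor
    · -- edges component
      have h1v : (v ++ [y]).length - v.length = 1 := by simp
      rw [h1v]
      simp [← List.dropLast_eq_take]
    · -- pairs component
      simp
  · -- the pass over v breaks at L < v.length: the full pass breaks at the same L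
    have hL : L < v.length := by simpa using remB_go_some_lt v 0 PySem.Set.empty (c - 1) L S hv
    have hfull : remB_go (v ++ [y]) 0 PySem.Set.empty (c - 1) = (some L, S) :=
      remB_go_append_some v [y] 0 PySem.Set.empty (c - 1) L S hv
    rw [hfull]
    dsimp only
    simp only [List.cons.injEq, and_true]
    constructor
    · -- edges component
      rw [List.dropLast_eq_take, List.take_take]
      congr 1
      simp [List.length_take]
      omega
    · -- pairs component
      rw [List.take_append_of_le_length (by omega)]

theorem main_lemma : ∀ (n : Nat) (e u : List Int) (c : Int), u.length = n →
    1 ≤ c → c - 1 ≤ ((PySem.Set.ofList u).length : Int) →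
    remA_go (n + 1) e u c = remove_userarticlepair_from_right_alt e u c := by
  intro n
  induction n with
  | zero =>
    intro e u c hlen h1 h2
    have hu : u = [] := List.length_eq_zero_iff.mp hlen
    subst hu
    have hc : c = 1 := by simp [PySem.Set.ofList] at h2; omega
    subst hc
    simp [remA_go, remove_userarticlepair_from_right_alt, remB_go, PySem.Set.empty]
  | succ n ih =>
    intro e u c hlen h1 h2
    rcases List.eq_nil_or_concat u with rfl | ⟨v, y, rfl⟩
    · simp at hlen
    simp only [List.concat_eq_append] at hlen h2 ⊢
    have hv : v.length = n := by simp at hlen; omega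
    rw [remA_go]
    by_cases hcond : ((PySem.Set.ofList (v ++ [y])).length : Int) = c - 1
    · rw [if_pos hcond]
      -- B also leaves both lists untouched: the loop never breaks and the target is met
      have hnone : (remB_go (v ++ [y]) 0 PySem.Set.empty (c - 1)).1 = none := by
        rw [remB_go_none_iff (v ++ [y]) 0 PySem.Set.empty (c - 1) (by simp [PySem.Set.empty]; omega)]
        rw [PySem.Set.update_empty]
        omega
      have hfin : remB_go (v ++ [y]) 0 PySem.Set.empty (c - 1) =
          (none, PySem.Set.ofList (v ++ [y])) := by
        rw [remB_go_none_eq _ _ _ _ hnone, PySem.Set.update_empty]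
      unfold remove_userarticlepair_from_right_alt
      rw [if_neg (by omega), hfin]
      dsimp only
      rw [if_neg (by omega)]
      simp
    · rw [if_neg hcond]
      rw [slice_pred_eq_dropLast, slice_pred_eq_dropLast, List.dropLast_concat]
      have hlt : c - 1 < ((PySem.Set.ofList (v ++ [y])).length : Int) :=
        lt_of_le_of_ne h2 (Ne.symm hcond)
      have hpre : c - 1 ≤ ((PySem.Set.ofList v).length : Int) := by
        have hofs := PySem.Set.ofList_append_singleton v y
        have hb := length_add_bounds (PySem.Set.ofList v) y
        rw [hofs] at hlt
        omega
      rw [ih e.dropLast v c hv h1 hpre]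
      exact alt_step e v y c h1 hpre hlt

-- ===== VERDICT (by name: the statement is the Claim_ definition above) =====
theorem remove_userarticlepair_from_right_spec : Claim_equal_remove_userarticlepair_from_right := by
  intro e u c _ hpre
  unfold Spec_remove_userarticlepair_from_right
  exact main_lemma u.length e u c rfl hpre.1 hpre.2
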